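-- pv_equiv track=rewrite | github.com/kunal0011/myWorksSpace | python/src/Amazon/1386cinemaseatallocation.py | maxNumberOfFamilies
-- ===== SOURCE A (Python) =====
-- from collections import defaultdict
--
-- def maxNumberOfFamilies(n: int, reservedSeats: list[list[int]]) -> int:
--     reserved = defaultdict(set)
--
--     # Mark reserved seats for each row
--     for seat in reservedSeats:
--         row, col = seat
--         reserved[row].add(col)
--
--     total_families = 2 * n  # Initially assume all rows can fit 2 families
--
--     for row in reserved:
--         can_place_left = all(
--             seat not in reserved[row] for seat in [2, 3, 4, 5])
--         can_place_right = all(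
--             seat not in reserved[row] for seat in [6, 7, 8, 9])
--         can_place_middle = all(
--             seat not in reserved[row] for seat in [4, 5, 6, 7])
--
--         # Start by assuming no families can be placed in this row
--         families_in_this_row = 0
--
--         # Check if left and right blocks can be filled
--         if can_place_left:
--             families_in_this_row += 1
--         if can_place_right:
--             families_in_this_row += 1
--         # If both left and right are blocked, check the middle block
--         if families_in_this_row == 0 and can_place_middle:
--             families_in_this_row += 1
--
--         # Reduce from the initial 2 possible families if families can't sit
--         total_families -= (2 - families_in_this_row)
--
--     return total_families
-- ===== SOURCE B (Python) =====
-- def _row_delta(left, right, mid):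
--     fam = (not left) + (not right)
--     if fam == 0 and not mid:
--         fam = 1
--     return fam - 2
--
--
-- def maxNumberOfFamilies(n: int, reservedSeats: list[list[int]]) -> int:
--     # Sort seats by row, then one linear scan: keep blocked-left/right/middle
--     # flags for the current run of equal rows, emit that row's family deficit
--     # whenever the row changes, and once more at the end.
--     total = 2 * n
--     prev = None
--     left = right = mid = False
--     for seat in sorted(reservedSeats, key=lambda s: s[0]):
--         row, col = seat[0], seat[1]
--         if prev is not None and row != prev:
--             total += _row_delta(left, right, mid)
--             left = right = mid = False
--         prev = row
--         if 2 <= col <= 5: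
--             left = True
--         if 6 <= col <= 9:
--             right = True
--         if 4 <= col <= 7:
--             mid = True
--     if prev is not None:
--         total += _row_delta(left, right, mid)
--     return total
-- ===== Notes on version B (the rewrite author's own statement) =====
-- stated objective: alternative
-- what changed: Replaces the dict-of-sets grouping and per-row block membership scans by sorting seats by row and one linear scan that keeps incremental blocked-left/right/middle flags, emitting each row's family deficit on row change.
import Mathlib
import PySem

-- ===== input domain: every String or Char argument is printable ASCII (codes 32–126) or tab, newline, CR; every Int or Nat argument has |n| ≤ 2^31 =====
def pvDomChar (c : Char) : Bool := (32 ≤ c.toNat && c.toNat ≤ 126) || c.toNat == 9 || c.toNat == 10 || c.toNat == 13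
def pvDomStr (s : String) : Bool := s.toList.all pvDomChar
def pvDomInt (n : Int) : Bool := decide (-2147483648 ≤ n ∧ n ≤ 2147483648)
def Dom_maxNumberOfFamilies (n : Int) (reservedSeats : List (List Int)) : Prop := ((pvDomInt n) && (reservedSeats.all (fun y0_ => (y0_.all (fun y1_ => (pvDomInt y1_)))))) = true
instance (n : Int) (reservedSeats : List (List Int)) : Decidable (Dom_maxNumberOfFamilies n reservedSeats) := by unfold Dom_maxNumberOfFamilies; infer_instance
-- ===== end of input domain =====

-- B replaces A's dict-of-sets grouping and per-row block membership scans by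
-- sorting the seats by row and one linear scan with incremental blocked flags.

-- ===== PORT A =====
-- one marking step of A's first loop; seats that are not [row, col] pairs make
-- Python's unpacking raise ValueError and are excluded by Pre_ (here: no-op)
def pvA_mark (d : PySem.Dict Int (PySem.Set Int)) (seat : List Int) : PySem.Dict Int (PySem.Set Int) :=
  match seat with
  | [row, col] => d.insert row (PySem.Set.add (d.getD row PySem.Set.empty) col)
  | _ => d

-- body of A's second loop: families that fit in a row with reserved-seat set s
def pvA_fam (s : PySem.Set Int) : Int :=
  let canLeft := ([2, 3, 4, 5] : List Int).all (fun seat => !(PySem.Set.contains s seat))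
  let canRight := ([6, 7, 8, 9] : List Int).all (fun seat => !(PySem.Set.contains s seat))
  let canMiddle := ([4, 5, 6, 7] : List Int).all (fun seat => !(PySem.Set.contains s seat))
  let fam : Int := 0
  let fam := if canLeft then fam + 1 else fam
  let fam := if canRight then fam + 1 else fam
  let fam := if fam == 0 && canMiddle then fam + 1 else fam
  fam

def maxNumberOfFamilies (n : Int) (reservedSeats : List (List Int)) : Int :=
  let reserved := reservedSeats.foldl pvA_mark PySem.Dict.empty
  (PySem.Dict.keys reserved).foldl
    (fun total row => total - (2 - pvA_fam (reserved.getD row PySem.Set.empty))) (2 * n)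

-- ===== PORT B =====
-- flag update for one seat's column: blocked-left (2..5), -right (6..9), -middle (4..7)
def pvB_upd (f : Bool × Bool × Bool) (col : Int) : Bool × Bool × Bool :=
  (f.1 || decide (2 ≤ col ∧ col ≤ 5),
   f.2.1 || decide (6 ≤ col ∧ col ≤ 9),
   f.2.2 || decide (4 ≤ col ∧ col ≤ 7))

-- _row_delta(left, right, mid) of Source B
def pvB_delta (f : Bool × Bool × Bool) : Int :=
  let fam : Int := (if f.1 then 0 else 1) + (if f.2.1 then 0 else 1)
  let fam := if fam == 0 && !f.2.2 then 1 else fam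
  fam - 2

-- one iteration of Source B's scan; seat[0]/seat[1] via headD/getD 1 (Pre_ gives length 2)
def pvB_step (st : Int × Option Int × Bool × Bool × Bool) (seat : List Int) :
    Int × Option Int × Bool × Bool × Bool :=
  let row := seat.headD 0
  let col := seat.getD 1 0
  match st with
  | (total, prev, f) =>
    match prev with
    | none => (total, some row, pvB_upd f col)
    | some q =>
        if row == q then (total, some row, pvB_upd f col)
        else (total + pvB_delta f, some row, pvB_upd (false, false, false) col)

-- Source B's trailing `if prev is not None: total += _row_delta(...)`
def pvB_fin (st : Int × Option Int × Bool × Bool × Bool) : Int :=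
  match st.2.1 with
  | none => st.1
  | some _ => st.1 + pvB_delta st.2.2

def maxNumberOfFamilies_alt (n : Int) (reservedSeats : List (List Int)) : Int :=
  pvB_fin ((PySem.List.sorted reservedSeats (fun s => s.headD 0) false).foldl
    pvB_step (2 * n, none, false, false, false))

-- ===== PRECONDITION & SPEC =====
-- Pre_ excludes seats that are not [row, col] pairs: Python's `row, col = seat`
-- raises ValueError there in A (and B's seat[0]/seat[1] can raise IndexError).
def Pre_maxNumberOfFamilies (n : Int) (reservedSeats : List (List Int)) : Prop :=
  ∀ seat ∈ reservedSeats, seat.length = 2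
instance (n : Int) (reservedSeats : List (List Int)) : Decidable (Pre_maxNumberOfFamilies n reservedSeats) := by unfold Pre_maxNumberOfFamilies; infer_instance

def pvWitness_maxNumberOfFamilies : Int × List (List Int) := (3, [[1, 2], [1, 3], [2, 6]])

def Spec_maxNumberOfFamilies (n : Int) (reservedSeats : List (List Int)) (out : Int) : Prop := out = maxNumberOfFamilies_alt n reservedSeats
instance (n : Int) (reservedSeats : List (List Int)) (out : Int) : Decidable (Spec_maxNumberOfFamilies n reservedSeats out) := by unfold Spec_maxNumberOfFamilies; infer_instance

-- ===== CLAIM (what is proved, stated in full; the proofs are below) =====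
def Claim_equal_maxNumberOfFamilies : Prop := ∀ (n : Int) (reservedSeats : List (List Int)), Dom_maxNumberOfFamilies n reservedSeats → Pre_maxNumberOfFamilies n reservedSeats → Spec_maxNumberOfFamilies n reservedSeats (maxNumberOfFamilies n reservedSeats)

-- ===== LEMMAS AND PROOFS =====

def pvRow (s : List Int) : Int := s.headD 0
def pvCol (s : List Int) : Int := s.getD 1 0

-- the three blocked flags of row r computed over a whole seat list
def pvFlagsFor (r : Int) (l : List (List Int)) : Bool × Bool × Bool :=
  (l.any (fun s => pvRow s == r && decide (2 ≤ pvCol s ∧ pvCol s ≤ 5)),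
   l.any (fun s => pvRow s == r && decide (6 ≤ pvCol s ∧ pvCol s ≤ 9)),
   l.any (fun s => pvRow s == r && decide (4 ≤ pvCol s ∧ pvCol s ≤ 7)))

-- the family deficit row r contributes, as a function of the seat list
def pvG (l : List (List Int)) (r : Int) : Int := pvB_delta (pvFlagsFor r l)

-- B's scan, as a recursive "remaining contribution" function of the state
def pvS : Option Int → Bool × Bool × Bool → List (List Int) → Int
  | none, _, [] => 0
  | some _, f, [] => pvB_delta f
  | none, f, s :: tl => pvS (some (pvRow s)) (pvB_upd f (pvCol s)) tl
  | some q, f, s :: tl =>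
      if pvRow s == q then pvS (some (pvRow s)) (pvB_upd f (pvCol s)) tl
      else pvB_delta f + pvS (some (pvRow s)) (pvB_upd (false, false, false) (pvCol s)) tl

theorem pvB_fin_foldl : ∀ (l : List (List Int)) (t : Int) (p : Option Int) (f : Bool × Bool × Bool),
    pvB_fin (l.foldl pvB_step (t, p, f)) = t + pvS p f l := by
  intro l
  induction l with
  | nil => intro t p f; cases p <;> simp [pvB_fin, pvS]
  | cons s tl ih =>
      intro t p f
      cases p with
      | none => simp only [List.foldl_cons, pvB_step, pvS]; exact ih t _ _
      | some q =>
          by_cases h : pvRow s == q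
          · simp only [List.foldl_cons, pvB_step, pvS, pvRow, pvCol] at *
            rw [if_pos h, if_pos h]; exact ih t _ _
          · simp only [List.foldl_cons, pvB_step, pvS, pvRow, pvCol] at *
            rw [if_neg h, if_neg h, ih, add_assoc]

theorem pvS_chunk_run : ∀ (ch : List (List Int)) (rest : List (List Int)) (r : Int)
    (f : Bool × Bool × Bool), (∀ x ∈ ch, pvRow x = r) →
    pvS (some r) f (ch ++ rest) = pvS (some r)
      (ch.foldl (fun g x => pvB_upd g (pvCol x)) f) rest := by
  intro ch
  induction ch with
  | nil => intro rest r f _; rfl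
  | cons x ch' ih =>
      intro rest r f h
      have hx : pvRow x = r := h x (List.mem_cons_self ..)
      simp only [List.cons_append, pvS, hx, beq_self_eq_true, if_pos, List.foldl_cons]
      exact ih rest r _ (fun y hy => h y (List.mem_cons_of_mem _ hy))

theorem pvS_emit : ∀ (rest : List (List Int)) (r : Int) (f : Bool × Bool × Bool),
    (∀ x ∈ rest, pvRow x ≠ r) →
    pvS (some r) f rest = pvB_delta f + pvS none (false, false, false) rest := by
  intro rest r f h
  cases rest with
  | nil => simp [pvS]
  | cons y ys =>
      have hy : (pvRow y == r) = false := by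
        simpa using h y (List.mem_cons_self ..)
      simp [pvS, hy]

theorem pvUpd_foldl : ∀ (ch : List (List Int)) (f : Bool × Bool × Bool),
    ch.foldl (fun g x => pvB_upd g (pvCol x)) f =
      (f.1 || ch.any (fun x => decide (2 ≤ pvCol x ∧ pvCol x ≤ 5)),
       f.2.1 || ch.any (fun x => decide (6 ≤ pvCol x ∧ pvCol x ≤ 9)),
       f.2.2 || ch.any (fun x => decide (4 ≤ pvCol x ∧ pvCol x ≤ 7))) := by
  intro ch
  induction ch with
  | nil => intro f; simp
  | cons x tl ih =>
      intro f
      rw [List.foldl_cons, ih]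
      simp [pvB_upd, Bool.or_assoc]

theorem pvS_sorted : ∀ (N : Nat) (l : List (List Int)), l.length ≤ N →
    (l.map pvRow).Pairwise (· ≤ ·) →
    ∃ L : List Int, L.Nodup ∧ (∀ r, r ∈ L ↔ r ∈ l.map pvRow) ∧
      pvS none (false, false, false) l = (L.map (pvG l)).sum := by
  intro N
  induction N with
  | zero =>
      intro l hl _
      rw [List.length_eq_zero_iff.mp (Nat.le_zero.mp hl)]
      exact ⟨[], List.nodup_nil, by simp, by simp [pvS]⟩
  | succ N ih =>
      intro l hl hsort
      match l, hl, hsort with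
      | [], _, _ => exact ⟨[], List.nodup_nil, by simp, by simp [pvS]⟩
      | s :: tl, hl, hsort =>
        set r := pvRow s with hr
        set p : List Int → Bool := fun x => pvRow x == r with hp
        set chunk := tl.takeWhile p with hchunk
        set rest := tl.dropWhile p with hrest
        have htl : chunk ++ rest = tl := List.takeWhile_append_dropWhile
        have hch : ∀ x ∈ chunk, pvRow x = r := by
          intro x hx
          simpa [hp] using List.mem_takeWhile_imp hx
        rw [List.map_cons, List.pairwise_cons] at hsort
        obtain ⟨hle, hsorttl⟩ := hsort
        have hsubrest : rest.Sublist tl := List.dropWhile_sublist _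
        have hsortrest : (rest.map pvRow).Pairwise (· ≤ ·) :=
          hsorttl.sublist (hsubrest.map pvRow)
        have hrestne : ∀ x ∈ rest, pvRow x ≠ r := by
          intro x hx
          obtain ⟨y, ys, hre⟩ : ∃ y ys, rest = y :: ys := by
            cases hxx : rest with
            | nil => rw [hxx] at hx; cases hx
            | cons a b => exact ⟨a, b, rfl⟩
          have hy : p y = false := by
            have h0 := List.head?_dropWhile_not p tl
            rw [← hrest, hre] at h0
            simpa using h0
          have hyr : pvRow y ≠ r := by simpa [hp] using hy
          have hymem : y ∈ tl := hsubrest.subset (by rw [hre]; exact List.mem_cons_self ..)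
          have h2 : r ≤ pvRow y := hle _ (List.mem_map_of_mem hymem)
          rw [hre] at hx
          rcases List.mem_cons.mp hx with rfl | hx'
          · exact hyr
          · have h1 : pvRow y ≤ pvRow x := by
              rw [hre, List.map_cons, List.pairwise_cons] at hsortrest
              exact hsortrest.1 _ (List.mem_map_of_mem hx')
            omega
        have hlen : rest.length ≤ N := by
          have h1 : chunk.length + rest.length = tl.length := by
            rw [← htl, List.length_append]
          have h2 : tl.length ≤ N := by
            simpa using Nat.le_of_succ_le_succ hl
          omega
        obtain ⟨L', hnd', hmem', hsum'⟩ := ih rest hlen hsortrest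
        have hAnyR : ∀ d : List Int → Bool,
            ((s :: tl).any (fun x => pvRow x == r && d x)) = (d s || chunk.any d) := by
          intro d
          rw [show s :: tl = s :: (chunk ++ rest) by rw [htl], List.any_cons, List.any_append]
          have h1 : (pvRow s == r) = true := by simp [hr]
          have h2 : rest.any (fun x => pvRow x == r && d x) = false := by
            rw [List.any_eq_false]
            intro x hx
            simp [hrestne x hx]
          have h3 : chunk.any (fun x => pvRow x == r && d x) = chunk.any d := by
            refine PySem.List.any_congr_mem (fun x hx => ?_)
            simp [hch x hx]
          rw [h1, h2, h3]
          simp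
        have hAnyNe : ∀ (r' : Int), r' ≠ r → ∀ d : List Int → Bool,
            ((s :: tl).any (fun x => pvRow x == r' && d x))
              = rest.any (fun x => pvRow x == r' && d x) := by
          intro r' hne d
          rw [show s :: tl = s :: (chunk ++ rest) by rw [htl], List.any_cons, List.any_append]
          have h1 : (pvRow s == r') = false := by
            rw [← hr]
            simpa using fun e => hne e.symm
          have h3 : chunk.any (fun x => pvRow x == r' && d x) = false := by
            rw [List.any_eq_false]
            intro x hx
            have hx1 : (pvRow x == r') = false := by
              rw [hch x hx]
              simpa using fun e => hne e.symm
            simp [hx1]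
          rw [h1, h3]
          simp
        have hrnotin : r ∉ L' := by
          intro hrL'
          obtain ⟨x, hx, hxe⟩ := List.mem_map.mp ((hmem' r).mp hrL')
          exact hrestne x hx hxe
        refine ⟨r :: L', List.nodup_cons.mpr ⟨hrnotin, hnd'⟩, ?_, ?_⟩
        · intro r'
          constructor
          · intro h
            rcases List.mem_cons.mp h with rfl | h'
            · exact List.mem_map.mpr ⟨s, List.mem_cons_self .., hr.symm⟩
            · obtain ⟨x, hx, hxe⟩ := List.mem_map.mp ((hmem' r').mp h')
              exact List.mem_map.mpr ⟨x, List.mem_cons_of_mem _ (hsubrest.subset hx), hxe⟩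
          · intro h
            obtain ⟨x, hx, hxe⟩ := List.mem_map.mp h
            rcases List.mem_cons.mp hx with rfl | hx'
            · rw [← hxe, ← hr]; exact List.mem_cons_self ..
            · rw [← htl] at hx'
              rcases List.mem_append.mp hx' with hc | hrst
              · rw [← hxe, hch x hc]; exact List.mem_cons_self ..
              · exact List.mem_cons_of_mem _ ((hmem' r').mpr (List.mem_map.mpr ⟨x, hrst, hxe⟩))
        · have hstep : pvS none (false, false, false) (s :: tl)
              = pvB_delta (pvFlagsFor r (s :: tl)) + pvS none (false, false, false) rest := by
            show pvS (some (pvRow s)) (pvB_upd (false, false, false) (pvCol s)) tl = _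
            rw [← hr, show tl = chunk ++ rest from htl.symm, pvS_chunk_run chunk rest r _ hch,
              pvS_emit rest r _ hrestne]
            congr 1
            rw [htl, pvUpd_foldl]
            unfold pvFlagsFor
            rw [hAnyR (fun x => decide (2 ≤ pvCol x ∧ pvCol x ≤ 5)),
              hAnyR (fun x => decide (6 ≤ pvCol x ∧ pvCol x ≤ 9)),
              hAnyR (fun x => decide (4 ≤ pvCol x ∧ pvCol x ≤ 7))]
            simp [pvB_upd]
          rw [hstep, hsum', List.map_cons, List.sum_cons]
          congr 1
          refine congrArg List.sum (List.map_congr_left fun r' hr' => ?_)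
          have hne : r' ≠ r := fun e => hrnotin (e ▸ hr')
          unfold pvG pvFlagsFor
          rw [hAnyNe r' hne _, hAnyNe r' hne _, hAnyNe r' hne _]

-- ==== A side ====

def pvA_mark' (d : PySem.Dict Int (PySem.Set Int)) (s : List Int) : PySem.Dict Int (PySem.Set Int) :=
  d.insert (pvRow s) (PySem.Set.add (d.getD (pvRow s) PySem.Set.empty) (pvCol s))

theorem pvA_mark_eq (rs : List (List Int)) (h : ∀ s ∈ rs, s.length = 2)
    (d : PySem.Dict Int (PySem.Set Int)) :
    rs.foldl pvA_mark d = rs.foldl pvA_mark' d := by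
  refine PySem.List.foldl_congr_mem _ _ _ _ (fun acc x hx => ?_)
  have hx2 := h x hx
  match x, hx2 with
  | [a, b], _ => rfl

theorem pvA_keys (rs : List (List Int)) :
    (rs.foldl pvA_mark' PySem.Dict.empty).keys = PySem.Set.ofList (rs.map pvRow) := by
  show (rs.foldl (fun d s => d.insert (pvRow s)
      (PySem.Set.add (d.getD (pvRow s) PySem.Set.empty) (pvCol s))) PySem.Dict.empty).keys = _
  rw [PySem.Dict.keys_foldl_insert_key]
  simp only [PySem.Dict.keys_empty]
  rfl

theorem pvA_mem (rs : List (List Int)) : ∀ (d : PySem.Dict Int (PySem.Set Int)) (r c : Int),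
    c ∈ (rs.foldl pvA_mark' d).getD r PySem.Set.empty ↔
      (c ∈ d.getD r PySem.Set.empty ∨ ∃ s ∈ rs, pvRow s = r ∧ pvCol s = c) := by
  induction rs with
  | nil => intro d r c; simp
  | cons s tl ih =>
      intro d r c
      rw [List.foldl_cons, ih]
      have hg : (pvA_mark' d s).getD r PySem.Set.empty =
          if r = pvRow s then PySem.Set.add (d.getD (pvRow s) PySem.Set.empty) (pvCol s)
          else d.getD r PySem.Set.empty := by
        simp [pvA_mark', PySem.Dict.getD_insert]
      rw [hg]
      by_cases hr : r = pvRow s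
      · subst hr
        rw [if_pos rfl, PySem.Set.mem_add]
        constructor
        · rintro ((h | h) | ⟨x, hx, hxr, hxc⟩)
          · exact Or.inl h
          · exact Or.inr ⟨s, List.mem_cons_self .., rfl, h.symm⟩
          · exact Or.inr ⟨x, List.mem_cons_of_mem _ hx, hxr, hxc⟩
        · rintro (h | ⟨x, hx, hxr, hxc⟩)
          · exact Or.inl (Or.inl h)
          · rcases List.mem_cons.mp hx with rfl | hx'
            · exact Or.inl (Or.inr hxc.symm)
            · exact Or.inr ⟨x, hx', hxr, hxc⟩
      · rw [if_neg hr]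
        constructor
        · rintro (h | ⟨x, hx, hxr, hxc⟩)
          · exact Or.inl h
          · exact Or.inr ⟨x, List.mem_cons_of_mem _ hx, hxr, hxc⟩
        · rintro (h | ⟨x, hx, hxr, hxc⟩)
          · exact Or.inl h
          · rcases List.mem_cons.mp hx with rfl | hx'
            · exact absurd hxr.symm hr
            · exact Or.inr ⟨x, hx', hxr, hxc⟩

-- A's if-chain on the three "can place" booleans
def pvA_famCore (canLeft canRight canMiddle : Bool) : Int :=
  let fam : Int := 0
  let fam := if canLeft then fam + 1 else fam
  let fam := if canRight then fam + 1 else fam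
  let fam := if fam == 0 && canMiddle then fam + 1 else fam
  fam

theorem pvFam8 : ∀ L R M : Bool, pvA_famCore (!L) (!R) (!M) - 2 = pvB_delta (L, R, M) := by
  decide

theorem pvBlock (S : PySem.Set Int) (rs : List (List Int)) (r lo hi : Int) (cl : List Int)
    (hcl : ∀ c : Int, c ∈ cl ↔ lo ≤ c ∧ c ≤ hi)
    (hmem : ∀ c, c ∈ S ↔ ∃ s ∈ rs, pvRow s = r ∧ pvCol s = c) :
    (cl.all (fun c => !(PySem.Set.contains S c))) =
      !(rs.any (fun s => pvRow s == r && decide (lo ≤ pvCol s ∧ pvCol s ≤ hi))) := by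
  have h1 : cl.any (fun c => PySem.Set.contains S c)
      = rs.any (fun s => pvRow s == r && decide (lo ≤ pvCol s ∧ pvCol s ≤ hi)) := by
    rw [Bool.eq_iff_iff]
    simp only [List.any_eq_true, Bool.and_eq_true, beq_iff_eq, decide_eq_true_eq,
      PySem.Set.contains_iff]
    constructor
    · rintro ⟨c, hc, hcS⟩
      obtain ⟨s, hs, hsr, hsc⟩ := (hmem c).mp hcS
      obtain ⟨hl, hh⟩ := (hcl c).mp hc
      exact ⟨s, hs, hsr, by omega⟩
    · rintro ⟨s, hs, hsr, hl, hh⟩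
      exact ⟨pvCol s, (hcl _).mpr ⟨hl, hh⟩, (hmem _).mpr ⟨s, hs, hsr, rfl⟩⟩
  rw [List.all_eq_not_any_not]
  simp only [Bool.not_not]
  rw [h1]

theorem pvA_fam_eq (S : PySem.Set Int) (rs : List (List Int)) (r : Int)
    (hmem : ∀ c, c ∈ S ↔ ∃ s ∈ rs, pvRow s = r ∧ pvCol s = c) :
    pvA_fam S - 2 = pvG rs r := by
  have hL := pvBlock S rs r 2 5 [2, 3, 4, 5] (by intro c; simp; omega) hmem
  have hR := pvBlock S rs r 6 9 [6, 7, 8, 9] (by intro c; simp; omega) hmem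
  have hM := pvBlock S rs r 4 7 [4, 5, 6, 7] (by intro c; simp; omega) hmem
  have hfam : pvA_fam S = pvA_famCore
      (([2, 3, 4, 5] : List Int).all (fun c => !(PySem.Set.contains S c)))
      (([6, 7, 8, 9] : List Int).all (fun c => !(PySem.Set.contains S c)))
      (([4, 5, 6, 7] : List Int).all (fun c => !(PySem.Set.contains S c))) := rfl
  rw [hfam, hL, hR, hM]
  exact pvFam8 _ _ _

-- ===== VERDICT (by name: the statement is the Claim_ definition above) =====
theorem maxNumberOfFamilies_spec : Claim_equal_maxNumberOfFamilies := by
  intro n rs _ hpre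
  unfold Spec_maxNumberOfFamilies
  -- B's value: sorted scan = sum of per-row deficits over some nodup row list L
  have hperm : (PySem.List.sorted rs (fun s => s.headD 0) false).Perm rs :=
    PySem.List.sorted_perm ..
  have hsort : ((PySem.List.sorted rs (fun s => s.headD 0) false).map pvRow).Pairwise (· ≤ ·) := by
    rw [List.pairwise_map]
    exact PySem.List.sorted_pairwise ..
  obtain ⟨L, hndL, hmemL, hsum⟩ := pvS_sorted
    (PySem.List.sorted rs (fun s => s.headD 0) false).length _ le_rfl hsort
  have hBval : maxNumberOfFamilies_alt n rs
      = 2 * n + (L.map (pvG (PySem.List.sorted rs (fun s => s.headD 0) false))).sum := by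
    show pvB_fin ((PySem.List.sorted rs (fun s => s.headD 0) false).foldl
      pvB_step (2 * n, none, false, false, false)) = _
    rw [pvB_fin_foldl, hsum]
  have hGss : ∀ r', pvG (PySem.List.sorted rs (fun s => s.headD 0) false) r' = pvG rs r' := by
    intro r'
    unfold pvG pvFlagsFor
    rw [hperm.any_eq, hperm.any_eq, hperm.any_eq]
  -- A's value: dict fold = sum of per-row deficits over the dict's keys
  have hmark := pvA_mark_eq rs hpre PySem.Dict.empty
  have hAval : maxNumberOfFamilies n rs
      = 2 * n + (((rs.foldl pvA_mark' PySem.Dict.empty).keys).map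
          (fun row => pvA_fam ((rs.foldl pvA_mark' PySem.Dict.empty).getD row PySem.Set.empty) - 2)).sum := by
    show (PySem.Dict.keys (rs.foldl pvA_mark PySem.Dict.empty)).foldl
      (fun total row => total - (2 - pvA_fam ((rs.foldl pvA_mark PySem.Dict.empty).getD row PySem.Set.empty)))
      (2 * n) = _
    rw [hmark]
    rw [PySem.List.foldl_congr_mem _ _
      (fun (total : Int) row => total + (pvA_fam ((rs.foldl pvA_mark' PySem.Dict.empty).getD row PySem.Set.empty) - 2)) _
      (fun acc x _ => by ring)]
    rw [PySem.List.foldl_add]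
  have hfamD : ∀ r', pvA_fam ((rs.foldl pvA_mark' PySem.Dict.empty).getD r' PySem.Set.empty) - 2 = pvG rs r' := by
    intro r'
    refine pvA_fam_eq _ rs r' (fun c => ?_)
    have := pvA_mem rs PySem.Dict.empty r' c
    simpa using this
  have hkeys := pvA_keys rs
  have hndK : ((rs.foldl pvA_mark' PySem.Dict.empty).keys).Nodup := by
    rw [hkeys]; exact PySem.Set.nodup_ofList ..
  have hLK : L.Perm ((rs.foldl pvA_mark' PySem.Dict.empty).keys) := by
    refine (List.perm_ext_iff_of_nodup hndL hndK).mpr (fun r' => ?_)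
    rw [hkeys, PySem.Set.mem_ofList, hmemL, (hperm.map pvRow).mem_iff]
  rw [hAval, hBval]
  congr 1
  calc (((rs.foldl pvA_mark' PySem.Dict.empty).keys).map
        (fun row => pvA_fam ((rs.foldl pvA_mark' PySem.Dict.empty).getD row PySem.Set.empty) - 2)).sum
      = (((rs.foldl pvA_mark' PySem.Dict.empty).keys).map (pvG rs)).sum := by
        exact congrArg List.sum (List.map_congr_left fun r' _ => hfamD r')
    _ = (L.map (pvG rs)).sum := ((hLK.map (pvG rs)).sum_eq).symm
    _ = (L.map (pvG (PySem.List.sorted rs (fun s => s.headD 0) false))).sum := by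
        exact congrArg List.sum (List.map_congr_left fun r' _ => (hGss r').symm)
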